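-- pv_equiv track=rewrite | github.com/PatrickFischerKSA/korrekturroboter | review_engine.py | _select_review_paragraphs
-- ===== SOURCE A (Python) =====
-- def _select_review_paragraphs(paragraphs: list[str], max_chars: int) -> tuple[list[str], bool]:
--     selected: list[str] = []
--     total = 0
--     for paragraph in paragraphs:
--         addition = len(paragraph) + 2
--         if selected and total + addition > max_chars:
--             break
--         selected.append(paragraph)
--         total += addition
--     return selected or paragraphs[:1], len(selected) < len(paragraphs)
-- ===== SOURCE B (Python) =====
-- def _select_review_paragraphs(paragraphs: list[str], max_chars: int) -> tuple[list[str], bool]: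
--     # Prefix sums of per-paragraph cost, then binary search for the cutoff.
--     cum = []
--     s = 0
--     for p in paragraphs:
--         s += len(p) + 2
--         cum.append(s)
--     lo, hi = 0, len(cum)
--     while lo < hi:
--         mid = (lo + hi) // 2
--         if cum[mid] <= max_chars:
--             lo = mid + 1
--         else:
--             hi = mid
--     k = lo
--     if paragraphs and k == 0:
--         k = 1  # the first paragraph is always kept
--     return paragraphs[:k], k < len(paragraphs)
-- ===== Notes on version B (the rewrite author's own statement) =====
-- stated objective: alternative
-- what changed: Replaces the stateful scan-with-break that appends paragraphs one by one with a prefix-sum table plus a binary search for the cutoff index, then a single slice.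
import Mathlib
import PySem

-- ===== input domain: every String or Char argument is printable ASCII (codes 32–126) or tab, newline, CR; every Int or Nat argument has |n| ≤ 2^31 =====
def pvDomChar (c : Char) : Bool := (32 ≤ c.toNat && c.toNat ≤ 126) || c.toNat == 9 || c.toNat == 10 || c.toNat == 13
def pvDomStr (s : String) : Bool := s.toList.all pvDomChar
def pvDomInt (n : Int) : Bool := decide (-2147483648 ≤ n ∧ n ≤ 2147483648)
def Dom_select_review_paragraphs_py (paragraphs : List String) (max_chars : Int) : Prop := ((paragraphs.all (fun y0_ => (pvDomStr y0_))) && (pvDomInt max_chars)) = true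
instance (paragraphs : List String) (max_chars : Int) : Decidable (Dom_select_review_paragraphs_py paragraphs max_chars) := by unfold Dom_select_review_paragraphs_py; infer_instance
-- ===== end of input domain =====

-- B replaces A's stateful scan-with-break by a prefix-sum table plus a binary search for
-- the cutoff index, then one slice (alternative decomposition; no speed claim).

-- ===== PORT A =====
-- the for-loop of A: state = (total, selected); `break` = returning `sel` early
def pvSelGo (mc : Int) : List String → Int → List String → List String
  | [], _, sel => sel
  | p :: rest, total, sel =>
    let addition : Int := PySem.Str.len p + 2
    if sel ≠ [] ∧ total + addition > mc then sel
    else pvSelGo mc rest (total + addition) (sel ++ [p])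

def select_review_paragraphs_py (paragraphs : List String) (max_chars : Int) : List String × Bool :=
  let selected := pvSelGo max_chars paragraphs 0 []
  ((if selected = [] then PySem.List.slice paragraphs none (some 1) else selected),
   decide (selected.length < paragraphs.length))

-- ===== PORT B =====
-- the cum-building loop of Source B: state = (s, cum)
def pvCumStep (st : Int × List Int) (p : String) : Int × List Int :=
  let s := st.1 + (PySem.Str.len p + 2)
  (s, st.2 ++ [s])

-- the while-loop of Source B; cum[mid] is ported as getD (mid is in range on every call)
def pvBsearch (cum : List Int) (mc : Int) (lo hi : Nat) : Nat :=
  if _h : lo < hi then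
    let mid := (lo + hi) / 2
    if cum.getD mid 0 ≤ mc then pvBsearch cum mc (mid + 1) hi
    else pvBsearch cum mc lo mid
  else lo
termination_by hi - lo
decreasing_by all_goals omega

def select_review_paragraphs_py_alt (paragraphs : List String) (max_chars : Int) : List String × Bool :=
  let cum := (paragraphs.foldl pvCumStep (0, [])).2
  let k0 := pvBsearch cum max_chars 0 cum.length
  let k := if paragraphs ≠ [] ∧ k0 = 0 then 1 else k0
  -- paragraphs[:k] with k : Nat, so plain take
  (paragraphs.take k, decide (k < paragraphs.length))

-- ===== PRECONDITION & SPEC =====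
def Spec_select_review_paragraphs_py (paragraphs : List String) (max_chars : Int) (out : List String × Bool) : Prop := out = select_review_paragraphs_py_alt paragraphs max_chars
instance (paragraphs : List String) (max_chars : Int) (out : List String × Bool) : Decidable (Spec_select_review_paragraphs_py paragraphs max_chars out) := by unfold Spec_select_review_paragraphs_py; infer_instance

-- ===== CLAIM (what is proved, stated in full; the proofs are below) =====
def Claim_equal_select_review_paragraphs_py : Prop := ∀ (paragraphs : List String) (max_chars : Int), Dom_select_review_paragraphs_py paragraphs max_chars → Spec_select_review_paragraphs_py paragraphs max_chars (select_review_paragraphs_py paragraphs max_chars)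

-- ===== LEMMAS AND PROOFS =====

-- proof-only helpers: the prefix-sum list from a running total, and the count of
-- paragraphs A's loop accepts starting from a running total
def pvCumFrom (s : Int) : List String → List Int
  | [] => []
  | p :: ps => (s + (PySem.Str.len p + 2)) :: pvCumFrom (s + (PySem.Str.len p + 2)) ps

def pvCnt (mc s : Int) : List String → Nat
  | [] => 0
  | p :: ps => if s + (PySem.Str.len p + 2) > mc then 0 else 1 + pvCnt mc (s + (PySem.Str.len p + 2)) ps

theorem pvLen_nonneg (p : String) : 0 ≤ PySem.Str.len p := by
  simp [PySem.Str.len_eq]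

theorem pvFoldl_cum (ps : List String) : ∀ (s : Int) (acc : List Int),
    (ps.foldl pvCumStep (s, acc)).2 = acc ++ pvCumFrom s ps := by
  induction ps with
  | nil => simp [pvCumFrom]
  | cons p ps ih =>
    intro s acc
    simp only [List.foldl_cons, pvCumStep, pvCumFrom, ih]
    simp

theorem pvCumFrom_length (ps : List String) : ∀ s, (pvCumFrom s ps).length = ps.length := by
  induction ps with
  | nil => simp [pvCumFrom]
  | cons p ps ih => intro s; simp [pvCumFrom, ih]

theorem pvMem_cumFrom {c : Int} (ps : List String) : ∀ s, c ∈ pvCumFrom s ps → s < c := by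
  induction ps with
  | nil => intro s h; simp [pvCumFrom] at h
  | cons p ps ih =>
    intro s h
    simp only [pvCumFrom, List.mem_cons] at h
    have hl := pvLen_nonneg p
    rcases h with h | h
    · omega
    · have := ih _ h; omega

theorem pvCnt_le_length (mc : Int) (ps : List String) : ∀ s, pvCnt mc s ps ≤ ps.length := by
  induction ps with
  | nil => intro s; simp [pvCnt]
  | cons p ps ih =>
    intro s
    simp only [pvCnt, List.length_cons]
    split
    · omega
    · have := ih (s + (PySem.Str.len p + 2)); omega

theorem pvCnt_zero_of_gt (mc : Int) (ps : List String) : ∀ s, mc < s → pvCnt mc s ps = 0 := by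
  cases ps with
  | nil => intro s _; rfl
  | cons p ps =>
    intro s h
    have := pvLen_nonneg p
    simp only [pvCnt]
    split
    · rfl
    · omega

-- characterisation of pvCnt as the threshold index in the prefix-sum list
theorem pvCnt_char (mc : Int) (ps : List String) : ∀ s,
    (∀ i, i < pvCnt mc s ps → (pvCumFrom s ps).getD i 0 ≤ mc) ∧
    (∀ i, pvCnt mc s ps ≤ i → i < ps.length → mc < (pvCumFrom s ps).getD i 0) := by
  induction ps with
  | nil => intro s; constructor <;> intro i h <;> simp [pvCnt] at h ⊢
  | cons p ps ih =>
    intro s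
    set a : Int := s + (PySem.Str.len p + 2) with ha
    by_cases hle : a > mc
    · constructor
      · intro i hi
        simp only [pvCnt] at hi
        rw [if_pos hle] at hi
        omega
      · intro i _ hi
        cases i with
        | zero => simpa [pvCumFrom] using hle
        | succ j =>
          simp only [pvCumFrom, List.getD_cons_succ]
          simp only [List.length_cons] at hi
          have hj : j < (pvCumFrom a ps).length := by rw [pvCumFrom_length]; omega
          rw [List.getD_eq_getElem _ 0 hj]
          have := pvMem_cumFrom ps a (List.getElem_mem hj)
          omega
    · have hcnt : pvCnt mc s (p :: ps) = 1 + pvCnt mc a ps := by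
        simp only [pvCnt]
        rw [if_neg hle]
      obtain ⟨ih1, ih2⟩ := ih a
      constructor
      · intro i hi
        rw [hcnt] at hi
        cases i with
        | zero => simp only [pvCumFrom, List.getD_cons_zero]; omega
        | succ j => simp only [pvCumFrom, List.getD_cons_succ]; exact ih1 j (by omega)
      · intro i hti hi
        rw [hcnt] at hti
        cases i with
        | zero => omega
        | succ j =>
          simp only [pvCumFrom, List.getD_cons_succ]
          simp only [List.length_cons] at hi
          exact ih2 j (by omega) (by omega)

-- binary-search correctness: given the threshold characterisation, the loop returns t
theorem pvBsearch_eq (cum : List Int) (mc : Int) (t : Nat)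
    (h1 : ∀ i, i < t → cum.getD i 0 ≤ mc)
    (h2 : ∀ i, t ≤ i → i < cum.length → mc < cum.getD i 0) :
    ∀ n lo hi, hi - lo ≤ n → lo ≤ t → t ≤ hi → hi ≤ cum.length →
      pvBsearch cum mc lo hi = t := by
  intro n
  induction n with
  | zero =>
    intro lo hi hn hlo hhi _
    rw [pvBsearch]
    simp only [dif_neg (by omega : ¬ lo < hi)]
    omega
  | succ n ih =>
    intro lo hi hn hlo hhi hlen
    rw [pvBsearch]
    by_cases h : lo < hi
    · simp only [dif_pos h]
      set mid := (lo + hi) / 2 with hmid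
      have hm1 : lo ≤ mid := by omega
      have hm2 : mid < hi := by omega
      by_cases hc : cum.getD mid 0 ≤ mc
      · simp only [if_pos hc]
        have htm : mid < t := by
          by_contra hx
          exact absurd (h2 mid (by omega) (by omega)) (by omega)
        exact ih (mid + 1) hi (by omega) (by omega) hhi hlen
      · simp only [if_neg hc]
        have htm : t ≤ mid := by
          by_contra hx
          exact hc (h1 mid (by omega))
        exact ih lo mid (by omega) hlo htm (by omega)
    · simp only [dif_neg h]; omega

-- A's loop, once selected is non-empty, appends exactly the next pvCnt paragraphs
theorem pvSelGo_eq (mc : Int) (rest : List String) : ∀ (s : Int) (sel : List String),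
    sel ≠ [] → pvSelGo mc rest s sel = sel ++ rest.take (pvCnt mc s rest) := by
  induction rest with
  | nil => intro s sel _; simp [pvSelGo, pvCnt]
  | cons p rest ih =>
    intro s sel hsel
    simp only [pvSelGo, pvCnt]
    by_cases hc : s + (PySem.Str.len p + 2) > mc
    · rw [if_pos ⟨hsel, hc⟩, if_pos hc]
      simp
    · rw [if_neg (by tauto), if_neg hc]
      rw [ih _ (sel ++ [p]) (by simp)]
      rw [Nat.add_comm 1 (pvCnt mc (s + (PySem.Str.len p + 2)) rest)]
      simp [List.take_succ_cons]

theorem pvMain (paragraphs : List String) (mc : Int) :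
    select_review_paragraphs_py paragraphs mc = select_review_paragraphs_py_alt paragraphs mc := by
  cases paragraphs with
  | nil =>
    simp [select_review_paragraphs_py, select_review_paragraphs_py_alt, pvSelGo, pvBsearch,
      PySem.List.slice]
  | cons p rest =>
    set a : Int := 0 + (PySem.Str.len p + 2) with ha
    have hla := pvLen_nonneg p
    -- A side
    have hA : pvSelGo mc (p :: rest) 0 [] = [p] ++ rest.take (pvCnt mc a rest) := by
      simp only [pvSelGo]
      rw [if_neg (by simp)]
      rw [pvSelGo_eq mc rest a ([] ++ [p]) (by simp)]
      simp only [List.nil_append]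
    -- B side: cum and the bisect index
    have hcum : ((p :: rest).foldl pvCumStep ((0 : Int), ([] : List Int))).2
        = pvCumFrom 0 (p :: rest) := by
      simpa using pvFoldl_cum (p :: rest) 0 []
    set t := pvCnt mc 0 (p :: rest) with ht
    obtain ⟨h1, h2⟩ := pvCnt_char mc (p :: rest) 0
    have hlen : (pvCumFrom 0 (p :: rest)).length = (p :: rest).length :=
      pvCumFrom_length _ _
    have hbs : pvBsearch (pvCumFrom 0 (p :: rest)) mc 0 (pvCumFrom 0 (p :: rest)).length = t := by
      refine pvBsearch_eq _ mc t h1 (by rw [hlen]; exact h2) (pvCumFrom 0 (p :: rest)).length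
        0 _ (by omega) (by omega) ?_ (le_refl _)
      rw [hlen]
      exact pvCnt_le_length mc (p :: rest) 0
    have hcnt_rest_le := pvCnt_le_length mc rest a
    have hAne : ¬ ([p] ++ rest.take (pvCnt mc a rest) = []) := by simp
    simp only [select_review_paragraphs_py, select_review_paragraphs_py_alt, hA, hcum, hbs,
      if_neg hAne]
    by_cases hfits : a > mc
    · -- first paragraph alone exceeds the budget: t = 0, B forces k = 1, A keeps just [p]
      have ht0 : t = 0 := by
        simp only [ht, pvCnt]
        rw [if_pos hfits]
      have hr0 : pvCnt mc a rest = 0 := pvCnt_zero_of_gt mc rest a (by omega)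
      rw [if_pos ⟨by simp, ht0⟩]
      simp [hr0]
    · -- the first paragraph fits: t = 1 + pvCnt mc a rest ≥ 1, no adjustment
      have ht1 : t = 1 + pvCnt mc a rest := by
        simp only [ht, pvCnt]
        rw [if_neg hfits]
      have hne2 : ¬ (p :: rest ≠ [] ∧ t = 0) := by
        intro hcon
        rw [ht1] at hcon
        exact absurd hcon.2 (by omega)
      rw [if_neg hne2]
      have hlenA : ([p] ++ rest.take (pvCnt mc a rest)).length = 1 + pvCnt mc a rest := by
        simp [Nat.min_eq_left hcnt_rest_le]
        omega
      simp only [Prod.mk.injEq]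
      refine ⟨?_, ?_⟩
      · rw [ht1, Nat.add_comm 1 (pvCnt mc a rest)]
        simp only [List.take_succ_cons, List.singleton_append]
      · rw [hlenA, ht1]

-- ===== VERDICT (by name: the statement is the Claim_ definition above) =====
theorem select_review_paragraphs_py_spec : Claim_equal_select_review_paragraphs_py := by
  intro paragraphs max_chars _
  unfold Spec_select_review_paragraphs_py
  exact pvMain paragraphs max_chars
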